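-- pv_equiv track=rewrite | github.com/qwrtln/Advent-of-Code | 14.py | calculate_load
-- ===== SOURCE A (Python) =====
-- def calculate_load(puzzle):
--     result = 0
--     cols = ["".join([r[i] for r in puzzle]) for i in range(len(puzzle[0]))]
--     for col in cols:
--         for index, row in enumerate(range(len(col), 0, -1)):
--             if col[index] == "O":
--                 result += row
--     return result
-- ===== SOURCE B (Python) =====
-- def calculate_load(puzzle):
--     n, w = len(puzzle), len(puzzle[0])
--     return sum(n - i for i, row in enumerate(puzzle) for ch in row[:w] if ch == "O")
-- ===== Notes on version B (the rewrite author's own statement) =====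
-- stated objective: simpler
-- what changed: B replaces A's build-all-transposed-columns-then-scan-each-column-with-a-descending-range pass by one direct pass over the rows, adding (number_of_rows - row_index) for every 'O' in the first len(puzzle[0]) cells of the row; Pre_ excludes exactly the inputs on which A raises IndexError (the empty grid, and grids with a row shorter than the first).
import Mathlib
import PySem

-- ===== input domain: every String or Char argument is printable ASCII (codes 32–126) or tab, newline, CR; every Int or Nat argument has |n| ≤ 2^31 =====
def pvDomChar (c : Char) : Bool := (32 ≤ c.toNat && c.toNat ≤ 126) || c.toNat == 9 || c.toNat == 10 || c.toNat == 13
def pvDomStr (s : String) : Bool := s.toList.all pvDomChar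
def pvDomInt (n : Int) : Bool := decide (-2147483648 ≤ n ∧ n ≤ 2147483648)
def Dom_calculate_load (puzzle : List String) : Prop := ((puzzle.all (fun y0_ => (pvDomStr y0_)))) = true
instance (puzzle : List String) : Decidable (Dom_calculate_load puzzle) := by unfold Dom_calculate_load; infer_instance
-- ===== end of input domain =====

-- B replaces A's transpose-then-column-scan with one direct pass over the rows (simpler, same cost).


-- ===== PORT A =====
-- 'puzzle[0]' raises IndexError on []; 'r[i]' raises IndexError when row r is shorter than
-- row 0 — both are excluded by Pre_, so the '.headD ""' / pyGetD defaults are never reached there.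
def calculate_load (puzzle : List String) : Int :=
  let cols : List (List Char) :=
    (PySem.List.pyRange 0 ((puzzle.headD "").toList.length : Int)).map
      (fun i => puzzle.map (fun r => PySem.List.pyGetD r.toList i ' '))
  cols.foldl
    (fun result col =>
      (PySem.List.enumerate (PySem.List.pyRange (col.length : Int) 0 (-1))).foldl
        (fun res p => if PySem.List.pyGetD col p.1 ' ' = 'O' then res + p.2 else res) result)
    0

-- ===== PORT B =====
-- 'puzzle[0]' raises IndexError on []; Pre_ excludes that, '.headD ""' stands for puzzle[0]
def calculate_load_alt (puzzle : List String) : Int :=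
  let n : Int := puzzle.length
  let w : Int := (puzzle.headD "").toList.length
  (PySem.List.enumerate puzzle).foldl
    (fun acc p =>
      (PySem.List.slice p.2.toList none (some w)).foldl
        (fun a c => if c = 'O' then a + (n - p.1) else a) acc) 0

-- ===== PRECONDITION & SPEC =====
-- Pre_ excludes exactly the inputs on which the Python A raises IndexError:
-- the empty grid ('puzzle[0]'), and grids with a row shorter than the first ('r[i]').
def Pre_calculate_load (puzzle : List String) : Prop :=
  puzzle ≠ [] ∧ ∀ r ∈ puzzle, (puzzle.headD "").toList.length ≤ r.toList.length
instance (puzzle : List String) : Decidable (Pre_calculate_load puzzle) := by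
  unfold Pre_calculate_load; infer_instance
def pvWitness_calculate_load : List String := ["O.", ".O", "OO"]

def Spec_calculate_load (puzzle : List String) (out : Int) : Prop := out = calculate_load_alt puzzle
instance (puzzle : List String) (out : Int) : Decidable (Spec_calculate_load puzzle out) := by unfold Spec_calculate_load; infer_instance

-- ===== CLAIM (what is proved, stated in full; the proofs are below) =====
def Claim_equal_calculate_load : Prop := ∀ (puzzle : List String), Dom_calculate_load puzzle → Pre_calculate_load puzzle → Spec_calculate_load puzzle (calculate_load puzzle)

-- ===== LEMMAS AND PROOFS =====

theorem pv_sum_range {f : Nat → Int} (n : Nat) :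
    ((List.range n).map f).sum = ∑ i ∈ Finset.range n, f i := by
  simp [Finset.sum, Finset.range_val, Multiset.range]

-- a conditional-accumulate foldl is the sum of a 0/ite map
theorem pv_foldl_if {α : Type} (l : List α) (c : α → Prop) [DecidablePred c] (v : α → Int)
    (acc : Int) :
    l.foldl (fun a x => if c x then a + v x else a) acc
      = acc + (l.map (fun x => if c x then v x else 0)).sum := by
  have h := PySem.List.foldl_congr_mem l (fun a x => if c x then a + v x else a)
    (fun a x => a + (if c x then v x else 0)) acc
    (by intro a x _; dsimp only; split_ifs <;> simp)
  rw [h, PySem.List.foldl_add]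

-- enumerate(range(m, 0, -1)) is the list of pairs (k, m - k)
theorem pv_enum_desc (m : Nat) :
    PySem.List.enumerate (PySem.List.pyRange (m : Int) 0 (-1))
      = (List.range m).map (fun (k : Nat) => ((k : Int), (m : Int) - k)) := by
  apply List.ext_getElem
  · simp [PySem.List.length_enumerate, PySem.List.length_pyRange_neg_one]
  · intro k h1 h2
    rw [PySem.List.getElem_enumerate]
    simp only [PySem.List.pyRange_neg_one, List.getElem_map, List.getElem_range, zero_add]

-- a sum over the characters of a list as a sum over its indices
theorem pv_map_sum_index (l : List Char) (f : Char → Int) :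
    (l.map f).sum = ∑ i ∈ Finset.range l.length, f (l.getD i ' ') := by
  rw [← pv_sum_range]
  congr 1
  apply List.ext_getElem
  · simp
  · intro k h1 h2
    simp only [List.length_map] at h1
    simp [List.getElem?_eq_getElem h1]

-- A's inner column scan as an index sum
theorem pv_innerA (col : List Char) (acc : Int) :
    (PySem.List.enumerate (PySem.List.pyRange (col.length : Int) 0 (-1))).foldl
      (fun res p => if PySem.List.pyGetD col p.1 ' ' = 'O' then res + p.2 else res) acc
    = acc + ∑ k ∈ Finset.range col.length,
        (if col.getD k ' ' = 'O' then ((col.length : Int) - k) else 0) := by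
  rw [pv_foldl_if (PySem.List.enumerate (PySem.List.pyRange (col.length : Int) 0 (-1)))
      (fun p => PySem.List.pyGetD col p.1 ' ' = 'O') (fun p => p.2) acc,
    pv_enum_desc, List.map_map, pv_sum_range]
  congr 1
  apply Finset.sum_congr rfl
  intro k _
  dsimp only [Function.comp_apply]
  rw [PySem.List.pyGetD_natCast]

-- a loop whose body adds a per-element summand is the sum of those summands
theorem pv_foldl_inner_sum {α : Type} (l : List α) (S : α → Int) (g : Int → α → Int)
    (h : ∀ (acc : Int), ∀ x ∈ l, g acc x = acc + S x) (init : Int) :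
    l.foldl g init = init + (l.map S).sum := by
  rw [PySem.List.foldl_congr_mem l g (fun acc x => acc + S x) init h,
    PySem.List.foldl_add]

-- A is the column-major double sum
theorem pv_A_eq (puzzle : List String) :
    calculate_load puzzle
      = ∑ i ∈ Finset.range ((puzzle.headD "").toList.length),
          ∑ k ∈ Finset.range puzzle.length,
            (if (puzzle.getD k "").toList.getD i ' ' = 'O'
              then ((puzzle.length : Int) - k) else 0) := by
  simp only [calculate_load]
  rw [PySem.List.pyRange_zero_natCast, List.map_map]
  rw [pv_foldl_inner_sum _
      (fun col => ∑ k ∈ Finset.range col.length,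
        (if col.getD k ' ' = 'O' then ((col.length : Int) - k) else 0)) _
      (fun acc col _ => pv_innerA col acc) 0]
  rw [zero_add, List.map_map, pv_sum_range]
  apply Finset.sum_congr rfl
  intro i _
  dsimp only [Function.comp_apply]
  simp only [List.length_map]
  apply Finset.sum_congr rfl
  intro k hk
  have hk' : k < puzzle.length := Finset.mem_range.mp hk
  rw [List.getD_eq_getElem _ _ (by simpa using hk'), List.getElem_map,
    PySem.List.pyGetD_natCast, List.getD_eq_getElem _ _ hk']

-- B is the row-major double sum over the grid's width (the first row's length)
theorem pv_B_eq (puzzle : List String)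
    (hw : ∀ r ∈ puzzle, (puzzle.headD "").toList.length ≤ r.toList.length) :
    calculate_load_alt puzzle
      = ∑ k ∈ Finset.range puzzle.length,
          ∑ i ∈ Finset.range ((puzzle.headD "").toList.length),
            (if (puzzle.getD k "").toList.getD i ' ' = 'O'
              then ((puzzle.length : Int) - k) else 0) := by
  simp only [calculate_load_alt]
  rw [pv_foldl_inner_sum (PySem.List.enumerate puzzle)
      (fun p => (((PySem.List.slice p.2.toList none
          (some ((puzzle.headD "").toList.length : Int))).map
        (fun c => if c = 'O' then ((puzzle.length : Int) - p.1) else 0)).sum)) _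
      (fun acc p _ => pv_foldl_if
        (PySem.List.slice p.2.toList none (some ((puzzle.headD "").toList.length : Int)))
        (fun c => c = 'O')
        (fun _ => ((puzzle.length : Int) - p.1)) acc) 0, zero_add]
  rw [PySem.List.enumerate_eq_map_pyRange puzzle ""]
  simp only [PySem.List.len]
  rw [PySem.List.pyRange_zero_natCast, List.map_map, List.map_map, pv_sum_range]
  apply Finset.sum_congr rfl
  intro k hk
  have hk' : k < puzzle.length := Finset.mem_range.mp hk
  dsimp only [Function.comp_apply]
  rw [PySem.List.pyGetD_natCast,
    PySem.List.slice_to _ (by positivity), pv_map_sum_index]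
  have hrow : (puzzle.headD "").toList.length ≤ (puzzle.getD k "").toList.length := by
    apply hw
    rw [List.getD_eq_getElem _ _ hk']
    exact List.getElem_mem hk'
  have hcast : (((puzzle.headD "").toList.length : Int)).toNat
      = (puzzle.headD "").toList.length := Int.toNat_natCast _
  have hlen : (List.take ((puzzle.headD "").toList.length : Int).toNat
      (puzzle.getD k "").toList).length = (puzzle.headD "").toList.length := by
    rw [List.length_take, hcast]
    omega
  rw [hlen]
  apply Finset.sum_congr rfl
  intro i hi
  have hi' : i < (puzzle.headD "").toList.length := Finset.mem_range.mp hi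
  rw [List.getD_eq_getElem _ _ (by rw [List.length_take, hcast]; omega), List.getElem_take]
  have hi'' : i < (puzzle.getD k "").toList.length := by omega
  have h3 : (puzzle.getD k "").toList.getD i ' ' = (puzzle.getD k "").toList[i] := by
    rw [List.getD_eq_getElem?_getD, List.getElem?_eq_getElem hi'']
    rfl
  rw [h3]

-- ===== VERDICT (by name: the statement is the Claim_ definition above) =====
theorem calculate_load_spec : Claim_equal_calculate_load := by
  intro puzzle _ hpre
  unfold Spec_calculate_load
  obtain ⟨hne, hw⟩ := hpre
  rw [pv_A_eq puzzle, pv_B_eq puzzle hw, Finset.sum_comm]
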